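-- pv_equiv track=rewrite | github.com/siriusctrl/Storm-auto-scheduler | test.py | find
-- ===== SOURCE A (Python) =====
-- def find(nums):
--     firstmap = {}
--
--     for n in nums:
--         if n[0] in firstmap:
--             firstmap[n[0]] = firstmap[n[0]] + [n]
--         else:
--              firstmap[n[0]] = [n]
--
--     res = []
--
--     for n in nums:
--         if n[-1] in firstmap:
--             for i in firstmap[n[-1]]:
--                 res.append((n,i))
--
--     return res
-- ===== SOURCE B (Python) =====
-- def find(nums):
--     return [(n, i) for n in nums for i in nums if n[-1] == i[0]]
-- ===== Notes on version B (the rewrite author's own statement) =====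
-- stated objective: simpler
-- what changed: Replaces the build-a-first-char-index-then-look-up two-phase algorithm with a single nested comprehension that scans nums directly for each element, preserving the exact output order.
import Mathlib
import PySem

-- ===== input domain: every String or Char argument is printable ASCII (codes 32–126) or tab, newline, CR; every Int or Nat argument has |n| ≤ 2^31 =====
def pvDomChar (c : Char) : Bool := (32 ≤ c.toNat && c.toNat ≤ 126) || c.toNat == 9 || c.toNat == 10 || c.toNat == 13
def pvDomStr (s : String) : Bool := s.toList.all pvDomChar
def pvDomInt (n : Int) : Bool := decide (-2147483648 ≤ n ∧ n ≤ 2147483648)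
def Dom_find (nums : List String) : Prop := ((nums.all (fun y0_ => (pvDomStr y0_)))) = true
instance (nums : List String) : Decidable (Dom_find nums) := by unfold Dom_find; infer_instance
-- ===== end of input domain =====

-- B replaces A's two-phase index-then-lookup with a single nested comprehension
-- scanning nums directly (simpler); same return value on all nonempty-string inputs.

-- ===== PORT A =====
-- keys are n[0] / n[-1] as Option Char (none would mean IndexError; Pre_ excludes that)
def findFirstmap (nums : List String) : PySem.Dict (Option Char) (List String) :=
  nums.foldl (fun m n =>
    let k := PySem.Str.pyGet? n 0
    if m.contains k then m.insert k (m.getD k [] ++ [n]) else m.insert k [n])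
    PySem.Dict.empty

def find (nums : List String) : List (String × String) :=
  let firstmap := findFirstmap nums
  nums.foldl (fun res n =>
    let k := PySem.Str.pyGet? n (-1)
    if firstmap.contains k then res ++ (firstmap.getD k []).map (fun i => (n, i)) else res) []

-- ===== PORT B =====
def find_alt (nums : List String) : List (String × String) :=
  nums.flatMap (fun n =>
    (nums.filter (fun i => PySem.Str.pyGet? n (-1) == PySem.Str.pyGet? i 0)).map
      (fun i => (n, i)))

-- ===== PRECONDITION & SPEC =====
-- Pre_ excludes lists containing an empty string: there Python A (and B) raise IndexError.
def Pre_find (nums : List String) : Prop := ∀ s ∈ nums, s ≠ ""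
instance (nums : List String) : Decidable (Pre_find nums) := by unfold Pre_find; infer_instance
def pvWitness_find : List String := ["ab", "ba", "cc"]
def Spec_find (nums : List String) (out : List (String × String)) : Prop := out = find_alt nums
instance (nums : List String) (out : List (String × String)) : Decidable (Spec_find nums out) := by unfold Spec_find; infer_instance

-- ===== CLAIM (what is proved, stated in full; the proofs are below) =====
def Claim_equal_find : Prop := ∀ (nums : List String), Dom_find nums → Pre_find nums → Spec_find nums (find nums)

-- ===== LEMMAS AND PROOFS =====

-- one step of A's first loop is always an insert of (old value ++ [n])
theorem find_step_eq (m : PySem.Dict (Option Char) (List String)) (n : String) :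
    (let k := PySem.Str.pyGet? n 0
     if m.contains k then m.insert k (m.getD k [] ++ [n]) else m.insert k [n]) =
    m.insert (PySem.Str.pyGet? n 0)
      (m.getD (PySem.Str.pyGet? n 0) [] ++ [n]) := by
  by_cases h : m.contains (PySem.Str.pyGet? n 0)
  · simp only [h, if_true]
  · simp only [Bool.not_eq_true] at h
    simp only [h, Bool.false_eq_true, if_false,
      PySem.Dict.getD_of_not_contains _ _ h, List.nil_append]

theorem find_map_getD (nums : List String) (m : PySem.Dict (Option Char) (List String))
    (c : Option Char) :
    (nums.foldl (fun m n =>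
        let k := PySem.Str.pyGet? n 0
        if m.contains k then m.insert k (m.getD k [] ++ [n]) else m.insert k [n]) m).getD c []
    = m.getD c [] ++ nums.filter (fun i => PySem.Str.pyGet? i 0 == c) := by
  induction nums generalizing m with
  | nil => simp
  | cons n t ih =>
    simp only [List.foldl_cons, List.filter_cons]
    rw [find_step_eq, ih, PySem.Dict.getD_insert]
    by_cases h : PySem.Str.pyGet? n 0 = c
    · rw [if_pos h.symm, if_pos (beq_iff_eq.mpr h), h]
      simp
    · rw [if_neg (fun hc => h hc.symm), if_neg (fun hc => h (eq_of_beq hc))]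

theorem find_map_contains (nums : List String) (m : PySem.Dict (Option Char) (List String))
    (c : Option Char) :
    (nums.foldl (fun m n =>
        let k := PySem.Str.pyGet? n 0
        if m.contains k then m.insert k (m.getD k [] ++ [n]) else m.insert k [n]) m).contains c
    = (m.contains c || nums.any (fun i => PySem.Str.pyGet? i 0 == c)) := by
  induction nums generalizing m with
  | nil => simp
  | cons n t ih =>
    simp only [List.foldl_cons, List.any_cons]
    rw [find_step_eq, ih, PySem.Dict.contains_insert]
    by_cases h : PySem.Str.pyGet? n 0 = c
    · rw [beq_iff_eq.mpr h.symm, beq_iff_eq.mpr h]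
      simp
    · rw [beq_eq_false_iff_ne.mpr (fun hc : c = _ => h hc.symm), beq_eq_false_iff_ne.mpr h]
      simp

theorem findFirstmap_getD (nums : List String) (c : Option Char) :
    (findFirstmap nums).getD c [] = nums.filter (fun i => PySem.Str.pyGet? i 0 == c) := by
  unfold findFirstmap
  rw [find_map_getD]
  simp

theorem findFirstmap_contains (nums : List String) (c : Option Char) :
    (findFirstmap nums).contains c = nums.any (fun i => PySem.Str.pyGet? i 0 == c) := by
  unfold findFirstmap
  rw [find_map_contains]
  simp

theorem find_outer (nums outer : List String) (res0 : List (String × String)) :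
    outer.foldl (fun res n =>
      let k := PySem.Str.pyGet? n (-1)
      if (findFirstmap nums).contains k then
        res ++ ((findFirstmap nums).getD k []).map (fun i => (n, i)) else res) res0
    = res0 ++ outer.flatMap (fun n =>
        (nums.filter (fun i => PySem.Str.pyGet? n (-1) == PySem.Str.pyGet? i 0)).map
          (fun i => (n, i))) := by
  induction outer generalizing res0 with
  | nil => simp
  | cons n t ih =>
    simp only [List.foldl_cons, List.flatMap_cons]
    have hfilt : nums.filter (fun i => PySem.Str.pyGet? i 0 == PySem.Str.pyGet? n (-1))
        = nums.filter (fun i => PySem.Str.pyGet? n (-1) == PySem.Str.pyGet? i 0) := by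
      apply List.filter_congr
      intro i _
      cases hb : (PySem.Str.pyGet? i 0 == PySem.Str.pyGet? n (-1)) with
      | true => exact ((beq_iff_eq).mpr (eq_of_beq hb).symm).symm
      | false =>
        symm
        exact beq_eq_false_iff_ne.mpr fun hc => beq_eq_false_iff_ne.mp hb hc.symm
    show List.foldl _ (if (findFirstmap nums).contains (PySem.Str.pyGet? n (-1)) then _ else _) t = _
    by_cases h : (findFirstmap nums).contains (PySem.Str.pyGet? n (-1)) = true
    · rw [if_pos h, ih, findFirstmap_getD, hfilt, List.append_assoc]
    · rw [if_neg h, ih]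
      simp only [Bool.not_eq_true] at h
      have hany := (findFirstmap_contains nums (PySem.Str.pyGet? n (-1))).symm.trans h
      have hnil : nums.filter (fun i => PySem.Str.pyGet? i 0 == PySem.Str.pyGet? n (-1)) = [] := by
        rw [List.filter_eq_nil_iff]
        intro i hi
        have := List.any_eq_false.mp hany i hi
        simpa using this
      rw [hfilt] at hnil
      rw [hnil]
      simp

-- ===== VERDICT (by name: the statement is the Claim_ definition above) =====
theorem find_spec : Claim_equal_find := by
  intro nums _ _
  unfold Spec_find find find_alt
  rw [find_outer nums nums []]
  simp
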